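-- pv_equiv track=rewrite | github.com/Mathieu-PETIT/Open-Data-Festival | Fonctions.py | verif_domaine
-- ===== SOURCE A (Python) =====
-- def verif_domaine(dom):
--     dom1 = dom
--     dom2 = ""
--     if "-" in dom:
--         chain=""
--         critere = 2
--         caract = len(dom)
--         for i in range(0, caract):
--             if dom[i] == "-":
--                 dom1 = chain
--                 chain = ""
--             else:
--                 chain += dom[i]
--         dom2 = chain
--     else:
--         critere=1
--     return dom1,dom2,critere
-- ===== SOURCE B (Python) =====
-- def verif_domaine(dom):
--     if "-" in dom:
--         parts = dom.split("-")
--         return parts[-2], parts[-1], 2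
--     return dom, "", 1
-- ===== Notes on version B (the rewrite author's own statement) =====
-- stated objective: simpler
-- what changed: The manual character-by-character accumulator loop is replaced by one hyphen-split call with negative indexing: dom1 is the second-to-last part, dom2 the last part.
import Mathlib
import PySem

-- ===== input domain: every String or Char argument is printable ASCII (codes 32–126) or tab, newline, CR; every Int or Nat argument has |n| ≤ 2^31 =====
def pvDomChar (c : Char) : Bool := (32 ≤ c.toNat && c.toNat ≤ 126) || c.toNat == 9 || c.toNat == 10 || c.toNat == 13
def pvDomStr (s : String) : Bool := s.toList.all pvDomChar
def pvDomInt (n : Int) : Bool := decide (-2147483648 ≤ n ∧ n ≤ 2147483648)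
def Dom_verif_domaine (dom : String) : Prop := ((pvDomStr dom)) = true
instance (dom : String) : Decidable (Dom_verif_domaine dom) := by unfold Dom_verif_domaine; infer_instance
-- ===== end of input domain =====

-- B replaces A's manual accumulator loop by a single split('-') with negative indexing (objective: simpler).

-- ===== PORT A =====
-- the loop body: on '-' move chain into dom1 and reset chain, else append the character
def verifStep (st : List Char × List Char) (c : Char) : List Char × List Char :=
  if c = '-' then (st.2, []) else (st.1, st.2 ++ [c])

def verif_domaine (dom : String) : String × String × Int :=
  if PySem.Str.isIn "-" dom then
    -- critere = 2; the for-loop over dom's characters with state (dom1, chain)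
    let st := dom.toList.foldl verifStep (dom.toList, [])
    (String.mk st.1, String.mk st.2, 2)
  else
    (dom, "", 1)

-- ===== PORT B =====
def verif_domaine_alt (dom : String) : String × String × Int :=
  if PySem.Str.isIn "-" dom then
    let parts := PySem.Chars.splitOn dom.toList ['-']
    -- parts[-2] / parts[-1]: in range, since the hyphen test guarantees at least two parts
    (String.mk (PySem.List.pyGetD parts (-2) []), String.mk (PySem.List.pyGetD parts (-1) []), 2)
  else
    (dom, "", 1)

-- ===== PRECONDITION & SPEC =====
def Spec_verif_domaine (dom : String) (out : String × String × Int) : Prop := out = verif_domaine_alt dom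
instance (dom : String) (out : String × String × Int) : Decidable (Spec_verif_domaine dom out) := by unfold Spec_verif_domaine; infer_instance

-- ===== CLAIM (what is proved, stated in full; the proofs are below) =====
def Claim_equal_verif_domaine : Prop := ∀ (dom : String), Dom_verif_domaine dom → Spec_verif_domaine dom (verif_domaine dom)

-- ===== LEMMAS AND PROOFS =====

-- proof-only spec of splitting on '-' with an already-read prefix of the current segment
def splitC (pre : List Char) : List Char → List (List Char)
  | [] => [pre]
  | c :: t => if c = '-' then pre :: splitC [] t else splitC (pre ++ [c]) t

theorem splitC_ne_nil (pre : List Char) (l : List Char) : splitC pre l ≠ [] := by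
  induction l generalizing pre with
  | nil => simp [splitC]
  | cons c t ih =>
    simp only [splitC]
    split_ifs
    · simp
    · exact ih _

theorem splitC_length (l : List Char) : ∀ (pre : List Char), '-' ∈ l →
    2 ≤ (splitC pre l).length := by
  induction l with
  | nil => intro pre h; simp at h
  | cons c t ih =>
    intro pre h
    by_cases hc : c = '-'
    · subst hc
      have h1 : 0 < (splitC ([] : List Char) t).length :=
        List.length_pos_of_ne_nil (splitC_ne_nil _ _)
      simp [splitC]
      omega
    · simp only [splitC, if_neg hc]
      rcases List.mem_cons.mp h with h1 | h2
      · exact absurd h1.symm hc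
      · exact ih _ h2

theorem getLastD_of_ne_nil {α : Type} (l : List α) (h : l ≠ []) (d d' : α) :
    l.getLastD d = l.getLastD d' := by
  cases l with
  | nil => exact absurd rfl h
  | cons x xs => rw [List.getLastD_cons, List.getLastD_cons]

theorem go_eq_splitC (l : List Char) :
    ∀ (fuel : Nat) (cur : List Char) (acc : List (List Char)), l.length < fuel →
    PySem.Chars.splitOn.go ['-'] fuel l cur acc = acc.reverse ++ splitC cur.reverse l := by
  induction l with
  | nil =>
    intro fuel cur acc h
    match fuel with
    | fuel + 1 =>
      rw [PySem.Chars.splitOn.go]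
      · simp [splitC]
      · omega
  | cons c t ih =>
    intro fuel cur acc h
    match fuel with
    | fuel + 1 =>
      rw [PySem.Chars.splitOn.go]
      by_cases hc : c = '-'
      · have hp : List.isPrefixOf ['-'] (c :: t) = true := by
          simp [List.isPrefixOf, hc]
        simp only [hp, if_pos]
        have hd : List.drop (['-'].length) (c :: t) = t := by simp
        rw [hd, ih fuel [] (cur.reverse :: acc) (by simp at h ⊢; omega)]
        simp [splitC, hc]
      · have hp : List.isPrefixOf ['-'] (c :: t) = false := by
          simp [List.isPrefixOf]
          intro h'; exact absurd h'.symm hc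
        simp only [hp, Bool.false_eq_true, if_false]
        rw [ih fuel (c :: cur) acc (by simp at h ⊢; omega)]
        simp [splitC, hc]

theorem foldl_verifStep (l : List Char) :
    ∀ (d1 ch : List Char),
    l.foldl verifStep (d1, ch) =
      ((splitC ch l).dropLast.getLastD d1, (splitC ch l).getLastD []) := by
  induction l with
  | nil => intro d1 ch; simp [splitC]
  | cons c t ih =>
    intro d1 ch
    by_cases hc : c = '-'
    · have hstep : verifStep (d1, ch) c = (ch, []) := by simp [verifStep, hc]
      simp only [List.foldl_cons, hstep, ih]
      have hsp : splitC ch (c :: t) = ch :: splitC [] t := by simp [splitC, hc]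
      rw [hsp]
      cases hps : splitC ([] : List Char) t with
      | nil => exact absurd hps (splitC_ne_nil _ _)
      | cons q qs =>
        simp only [List.dropLast_cons₂, List.getLastD_cons]
    · have hstep : verifStep (d1, ch) c = (d1, ch ++ [c]) := by simp [verifStep, hc]
      simp only [List.foldl_cons, hstep, ih]
      have hsp : splitC ch (c :: t) = splitC (ch ++ [c]) t := by simp [splitC, hc]
      rw [hsp]

theorem pyGet?_neg_two {α : Type} (ps : List α) :
    PySem.List.pyGet? ps (-2) = ps.dropLast.getLast? := by
  induction ps using List.reverseRecOn with
  | nil => rfl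
  | append_singleton xs x _ =>
    simp only [PySem.List.pyGet?, PySem.List.pyIdx?, List.dropLast_concat]
    norm_num
    by_cases h : 2 ≤ xs.length + 1
    · rw [if_pos (by omega)]
      have h1 : xs.length + 1 - (2 : Int).toNat = xs.length - 1 := by omega
      rw [h1]
      simp only [Option.bind_some]
      cases xs with
      | nil => simp at h
      | cons a t =>
        rw [List.getElem?_append_left (by simp)]
        rw [List.getLast?_eq_getElem?]
    · have hx : xs = [] := by
        cases xs with | nil => rfl | cons a t => simp at h
      subst hx; rfl

theorem pyGet?_neg_one_getLast? {α : Type} (ps : List α) :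
    PySem.List.pyGet? ps (-1) = ps.getLast? := by
  induction ps using List.reverseRecOn with
  | nil => rfl
  | append_singleton xs x _ =>
    rw [PySem.List.pyGet?_neg_one_append_singleton, List.getLast?_concat]

-- ===== VERDICT (by name: the statement is the Claim_ definition above) =====
theorem verif_domaine_spec : Claim_equal_verif_domaine := by
  intro dom _
  unfold Spec_verif_domaine verif_domaine verif_domaine_alt
  by_cases h : PySem.Str.isIn "-" dom = true
  · rw [if_pos h, if_pos h]
    have hmem : '-' ∈ dom.toList :=
      ((PySem.Chars.isIn_iff_infix ['-'] dom.toList).mp h).subset (by simp)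
    have hsplit : PySem.Chars.splitOn dom.toList ['-'] = splitC [] dom.toList := by
      unfold PySem.Chars.splitOn
      rw [go_eq_splitC _ _ _ _ (by omega)]
      simp
    have hlen : 2 ≤ (splitC ([] : List Char) dom.toList).length :=
      splitC_length _ _ hmem
    have hdl : (splitC ([] : List Char) dom.toList).dropLast ≠ [] := by
      intro hz
      have := congrArg List.length hz
      simp [List.length_dropLast] at this
      omega
    have hne := splitC_ne_nil ([] : List Char) dom.toList
    simp only [foldl_verifStep, hsplit, PySem.List.pyGetD, pyGet?_neg_two,
      pyGet?_neg_one_getLast?]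
    rw [← List.getLastD_eq_getLast?, ← List.getLastD_eq_getLast?]
    rw [getLastD_of_ne_nil _ hdl dom.toList []]
  · rw [if_neg h, if_neg h]
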